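-- pv_equiv track=rewrite | github.com/OTOYO1020/ChatDev_Intermediate | WareHouse/C_242__20250512011138/counter.py | count_valid_integers
-- ===== SOURCE A (Python) =====
-- def count_valid_integers(N: int) -> int:
--     mod = 998244353
--     # Initialize the dynamic programming table with 10 columns for digits 0 to 9
--     dp = [[0] * 10 for _ in range(N + 1)]  # 10 columns for digits 0 to 9, but we will only use 1-9
--     # Base case: single-digit integers (1 to 9)
--     for j in range(1, 10):
--         dp[1][j] = 1  # Store in dp[1][1] to dp[1][9]
--     # Fill the dp table for lengths from 2 to N
--     for i in range(2, N + 1):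
--         for j in range(1, 10):  # j should be from 1 to 9
--             dp[i][j] = 0  # Initialize dp[i][j] to 0 before accumulation
--             for k in range(1, 10):  # k should also be from 1 to 9
--                 if abs(j - k) >= 2:  # Ensure the digit difference condition is met
--                     dp[i][j] = (dp[i][j] + dp[i - 1][k]) % mod  # Accumulate counts correctly
--     # Sum up valid integers of length N (only considering digits 1 to 9)
--     total_count = sum(dp[N][j] for j in range(1, 10)) % mod
--     return total_count
-- ===== SOURCE B (Python) =====
-- def count_valid_integers(N: int) -> int:
--     mod = 998244353
--     def mat_mul(A, B):
--         return [[sum(A[i][k] * B[k][j] for k in range(9)) % mod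
--                  for j in range(9)] for i in range(9)]
--     M = [[1 if abs(i - j) >= 2 else 0 for j in range(9)] for i in range(9)]
--     P = [[1 if i == j else 0 for j in range(9)] for i in range(9)]
--     e = N - 1
--     while e > 0:
--         if e % 2 == 1:
--             P = mat_mul(P, M)
--         M = mat_mul(M, M)
--         e //= 2
--     return sum(P[i][j] for i in range(9) for j in range(9)) % mod
-- ===== Notes on version B (the rewrite author's own statement) =====
-- stated objective: faster
-- what changed: Replaces the O(N)-row dynamic-programming table with binary exponentiation of the fixed 9x9 transition matrix (digits 1-9, |difference| >= 2), summing all entries of M^(N-1) mod 998244353.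
-- outside the precondition, e.g. on count_valid_integers(0): A raises IndexError, B returns 9
import Mathlib
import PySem

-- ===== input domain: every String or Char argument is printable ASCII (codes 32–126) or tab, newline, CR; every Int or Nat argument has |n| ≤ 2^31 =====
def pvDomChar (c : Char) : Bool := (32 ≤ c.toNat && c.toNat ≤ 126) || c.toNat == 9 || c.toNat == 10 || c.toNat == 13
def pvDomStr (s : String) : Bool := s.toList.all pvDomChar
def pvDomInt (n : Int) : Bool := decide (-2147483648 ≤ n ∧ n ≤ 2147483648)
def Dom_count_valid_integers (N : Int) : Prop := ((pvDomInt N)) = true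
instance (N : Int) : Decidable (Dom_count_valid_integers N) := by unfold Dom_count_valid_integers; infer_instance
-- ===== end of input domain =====

-- B replaces the O(N)-row DP table with binary exponentiation of the fixed 9x9 transition matrix (same result mod 998244353).

-- ===== PORT A =====
-- dp[i][j] read / write on the list-of-lists table (indices are in range on Pre_)
def pvGet2 (dp : List (List Int)) (i j : Int) : Int :=
  (dp.getD i.toNat []).getD j.toNat 0

def pvSet2 (dp : List (List Int)) (i j : Int) (v : Int) : List (List Int) :=
  dp.set i.toNat ((dp.getD i.toNat []).set j.toNat v)

def count_valid_integers (N : Int) : Int :=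
  let md : Int := 998244353
  let dp : List (List Int) := (PySem.List.pyRange 0 (N + 1) 1).map (fun _ => List.replicate 10 (0 : Int))
  let dp := (PySem.List.pyRange 1 10 1).foldl (fun dp j => pvSet2 dp 1 j 1) dp
  let dp := (PySem.List.pyRange 2 (N + 1) 1).foldl (fun dp i =>
      (PySem.List.pyRange 1 10 1).foldl (fun dp j =>
        let dp := pvSet2 dp i j 0
        (PySem.List.pyRange 1 10 1).foldl (fun dp k =>
          if 2 ≤ |j - k| then
            pvSet2 dp i j (PySem.Int.mod (pvGet2 dp i j + pvGet2 dp (i - 1) k) md)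
          else dp) dp) dp) dp
  PySem.Int.mod (((PySem.List.pyRange 1 10 1).map (fun j => pvGet2 dp N j)).sum) md

-- ===== PORT B =====
def pvMd : Int := 998244353

def pvGetE (A : List (List Int)) (i k : Nat) : Int := (A.getD i []).getD k 0

def pvMatMul (A B : List (List Int)) : List (List Int) :=
  (List.range 9).map (fun i => (List.range 9).map (fun j =>
    PySem.Int.mod (((List.range 9).map (fun k => pvGetE A i k * pvGetE B k j)).sum) pvMd))

def pvM0 : List (List Int) :=
  (List.range 9).map (fun i => (List.range 9).map (fun j =>
    if 2 ≤ |(i : Int) - (j : Int)| then 1 else 0))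

def pvId9 : List (List Int) :=
  (List.range 9).map (fun i => (List.range 9).map (fun j => if i = j then (1 : Int) else 0))

def pvPowLoop (P M : List (List Int)) (e : Nat) : List (List Int) :=
  if h : e = 0 then P
  else pvPowLoop (if e % 2 = 1 then pvMatMul P M else P) (pvMatMul M M) (e / 2)
termination_by e
decreasing_by exact Nat.div_lt_self (Nat.pos_of_ne_zero h) (by norm_num)

def count_valid_integers_alt (N : Int) : Int :=
  let P := pvPowLoop pvId9 pvM0 (N - 1).toNat
  PySem.Int.mod (((List.range 9).flatMap (fun i => (List.range 9).map (fun j => pvGetE P i j))).sum) pvMd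

-- ===== PRECONDITION & SPEC =====
-- Pre_ excludes exactly N ≤ 0, where A raises IndexError (dp[1] does not exist).
def Pre_count_valid_integers (N : Int) : Prop := 1 ≤ N
instance (N : Int) : Decidable (Pre_count_valid_integers N) := by unfold Pre_count_valid_integers; infer_instance
def pvWitness_count_valid_integers : Int := 3

def Spec_count_valid_integers (N : Int) (out : Int) : Prop := out = count_valid_integers_alt N
instance (N : Int) (out : Int) : Decidable (Spec_count_valid_integers N out) := by unfold Spec_count_valid_integers; infer_instance

-- ===== CLAIM (what is proved, stated in full; the proofs are below) =====
def Claim_equal_count_valid_integers : Prop := ∀ (N : Int), Dom_count_valid_integers N → Pre_count_valid_integers N → Spec_count_valid_integers N (count_valid_integers N)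

-- ===== LEMMAS AND PROOFS =====

-- modulus as a Nat, and the concrete 1..9 digit list
def pvP : Nat := 998244353
def pvJs : List Int := [1, 2, 3, 4, 5, 6, 7, 8, 9]
def pvRep0 : List Int := List.replicate 10 0

lemma pyRange_js : PySem.List.pyRange 1 10 1 = pvJs := by decide

lemma cast_pymod (a : Int) : ((PySem.Int.mod a pvMd : Int) : ZMod pvP) = (a : ZMod pvP) := by
  rw [PySem.Int.mod_eq_emod_of_pos (by norm_num [pvMd])]
  rw [show pvMd = ((pvP : Nat) : Int) from by norm_num [pvMd, pvP]]
  exact ZMod.intCast_mod a pvP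

-- basic pvSet2 / pvGet2 bookkeeping
lemma getD_set_self (l : List Int) (i : Nat) (x : Int) (h : i < l.length) :
    (l.set i x).getD i 0 = x := by
  simp [List.getD_eq_getElem?_getD, h]

lemma rowD_set_self (dp : List (List Int)) (i : Nat) (x : List Int) (h : i < dp.length) :
    (dp.set i x).getD i [] = x := by
  simp [List.getD_eq_getElem?_getD, h]

lemma rowD_set_ne (dp : List (List Int)) (i m : Nat) (x : List Int) (h : m ≠ i) :
    (dp.set i x).getD m [] = dp.getD m [] := by
  simp [List.getD_eq_getElem?_getD, List.getElem?_set_ne (show i ≠ m from fun e => h e.symm)]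

lemma set2_length (dp : List (List Int)) (i j : Int) (v : Int) :
    (pvSet2 dp i j v).length = dp.length := by simp [pvSet2]

lemma set2_row_self (dp : List (List Int)) (i j : Int) (v : Int) (h : i.toNat < dp.length) :
    (pvSet2 dp i j v).getD i.toNat [] = (dp.getD i.toNat []).set j.toNat v :=
  rowD_set_self dp i.toNat _ h

lemma set2_row_ne (dp : List (List Int)) (i j : Int) (v : Int) (m : Nat) (h : m ≠ i.toNat) :
    (pvSet2 dp i j v).getD m [] = dp.getD m [] :=
  rowD_set_ne dp i.toNat m _ h

lemma set2_set2 (dp : List (List Int)) (i j : Int) (a b : Int) (h : i.toNat < dp.length) :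
    pvSet2 (pvSet2 dp i j a) i j b = pvSet2 dp i j b := by
  unfold pvSet2
  rw [rowD_set_self dp i.toNat _ h]
  rw [List.set_set, List.set_set]

lemma get2_set2_self (dp : List (List Int)) (i j : Int) (v : Int)
    (h : i.toNat < dp.length) (hr : j.toNat < (dp.getD i.toNat []).length) :
    pvGet2 (pvSet2 dp i j v) i j = v := by
  simp only [pvGet2, set2_row_self dp i j v h]
  exact getD_set_self _ _ _ hr

lemma get2_set2_other (dp : List (List Int)) (i j : Int) (v : Int) (i' k : Int)
    (h : i'.toNat ≠ i.toNat) : pvGet2 (pvSet2 dp i j v) i' k = pvGet2 dp i' k := by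
  simp only [pvGet2, set2_row_ne dp i j v i'.toNat h]

-- the per-cell accumulation and the per-row rebuild used by the characterisation of A
def pvF (prev : List Int) (j : Int) : Int :=
  pvJs.foldl (fun a k => if 2 ≤ |j - k| then PySem.Int.mod (a + prev.getD k.toNat 0) pvMd else a) 0

def pvNextRow (prev : List Int) : List Int :=
  pvJs.foldl (fun r j => r.set j.toNat (pvF prev j)) pvRep0

def pvRowA : Nat → List Int
  | 0 => pvRep0
  | 1 => [0, 1, 1, 1, 1, 1, 1, 1, 1, 1]
  | (n + 2) => pvNextRow (pvRowA (n + 1))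

-- the k-loop of A, at row i column j, is one accumulation into cell (i, j)
lemma kfold (dp : List (List Int)) (i j : Int) (hi : 2 ≤ i) (hlen : i.toNat < dp.length)
    (hrow : (dp.getD i.toNat []).length = 10) (hj : j.toNat < 10) (ks : List Int) :
    ∀ acc : Int,
    ks.foldl (fun dp' k => if 2 ≤ |j - k| then
        pvSet2 dp' i j (PySem.Int.mod (pvGet2 dp' i j + pvGet2 dp' (i - 1) k) pvMd) else dp')
      (pvSet2 dp i j acc)
    = pvSet2 dp i j (ks.foldl (fun a k => if 2 ≤ |j - k| then
        PySem.Int.mod (a + pvGet2 dp (i - 1) k) pvMd else a) acc) := by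
  induction ks with
  | nil => intro acc; rfl
  | cons k t ih =>
    intro acc
    simp only [List.foldl_cons]
    by_cases hc : 2 ≤ |j - k|
    · rw [if_pos hc, if_pos hc]
      rw [get2_set2_self dp i j acc hlen (by rw [hrow]; exact hj)]
      rw [get2_set2_other dp i j acc (i - 1) k (by omega)]
      rw [set2_set2 dp i j acc _ hlen]
      exact ih _
    · rw [if_neg hc, if_neg hc]
      exact ih _

-- the j-loop of A rebuilds row i from row i-1, leaving every other row alone
lemma jfold (i : Int) (hi : 2 ≤ i) (js : List Int) (hjs : ∀ j ∈ js, j.toNat < 10) :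
    ∀ dp : List (List Int), i.toNat < dp.length → (dp.getD i.toNat []).length = 10 →
    js.foldl (fun dp j =>
        pvJs.foldl (fun dp' k => if 2 ≤ |j - k| then
            pvSet2 dp' i j (PySem.Int.mod (pvGet2 dp' i j + pvGet2 dp' (i - 1) k) pvMd) else dp')
          (pvSet2 dp i j 0)) dp
    = dp.set i.toNat
        (js.foldl (fun r j => r.set j.toNat (pvF (dp.getD (i - 1).toNat []) j)) (dp.getD i.toNat [])) := by
  induction js with
  | nil =>
    intro dp hlen _
    simp only [List.foldl_nil]
    rw [show dp.getD i.toNat [] = dp[i.toNat]'hlen from by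
      simp [List.getD_eq_getElem?_getD, List.getElem?_eq_getElem hlen]]
    simp
  | cons j t ih =>
    intro dp hlen hrow
    have hj := hjs j (by simp)
    simp only [List.foldl_cons]
    rw [kfold dp i j hi hlen hrow hj pvJs 0]
    have hstep : ∀ k : Int, pvGet2 dp (i - 1) k = (dp.getD (i - 1).toNat []).getD k.toNat 0 :=
      fun k => rfl
    have hF : (pvJs.foldl (fun a k => if 2 ≤ |j - k| then
        PySem.Int.mod (a + pvGet2 dp (i - 1) k) pvMd else a) 0) = pvF (dp.getD (i - 1).toNat []) j := rfl
    rw [hF]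
    set dp1 := pvSet2 dp i j (pvF (dp.getD (i - 1).toNat []) j) with hdp1
    have h1 : i.toNat < dp1.length := by rw [hdp1, set2_length]; exact hlen
    have h2 : (dp1.getD i.toNat []).length = 10 := by
      rw [hdp1, set2_row_self dp i j _ hlen, List.length_set]; exact hrow
    rw [ih (fun x hx => hjs x (List.mem_cons_of_mem _ hx)) dp1 h1 h2]
    rw [show dp1.getD (i - 1).toNat [] = dp.getD (i - 1).toNat [] from
      set2_row_ne dp i j _ _ (by omega)]
    rw [show dp1.getD i.toNat [] = (dp.getD i.toNat []).set j.toNat (pvF (dp.getD (i - 1).toNat []) j) from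
      set2_row_self dp i j _ hlen]
    rw [hdp1]
    simp only [pvSet2, List.set_set]

-- the base loop writes row 1 of the fresh table
lemma basefold (js : List Int) :
    ∀ dp : List (List Int), 1 < dp.length →
    js.foldl (fun dp j => pvSet2 dp 1 j 1) dp
    = dp.set 1 (js.foldl (fun r j => r.set j.toNat (1 : Int)) (dp.getD 1 [])) := by
  induction js with
  | nil =>
    intro dp h
    simp only [List.foldl_nil]
    rw [show dp.getD 1 [] = dp[1]'h from by
      simp [List.getD_eq_getElem?_getD, List.getElem?_eq_getElem h]]
    simp
  | cons j t ih =>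
    intro dp h
    simp only [List.foldl_cons]
    rw [ih _ (by rw [set2_length]; exact h)]
    simp only [pvSet2, Int.toNat_one]
    rw [rowD_set_self _ _ _ h, List.set_set]

-- the outer loop invariant: after the rows 2..n+1 have been processed,
-- row m holds pvRowA m for 1 ≤ m ≤ n+1 and the untouched rows are still zero
lemma outer_inv (N : Int) (hN : 1 ≤ N) (n : Nat) (hn : (n : Int) ≤ N - 1) :
    ((PySem.List.pyRange 2 (2 + (n : Int)) 1).foldl (fun dp i =>
        pvJs.foldl (fun dp j =>
          pvJs.foldl (fun dp' k => if 2 ≤ |j - k| then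
              pvSet2 dp' i j (PySem.Int.mod (pvGet2 dp' i j + pvGet2 dp' (i - 1) k) pvMd) else dp')
            (pvSet2 dp i j 0)) dp)
      ((List.replicate (N + 1).toNat pvRep0).set 1 (pvRowA 1))).length = (N + 1).toNat
    ∧ ∀ m : Nat, m < (N + 1).toNat →
      ((PySem.List.pyRange 2 (2 + (n : Int)) 1).foldl (fun dp i =>
        pvJs.foldl (fun dp j =>
          pvJs.foldl (fun dp' k => if 2 ≤ |j - k| then
              pvSet2 dp' i j (PySem.Int.mod (pvGet2 dp' i j + pvGet2 dp' (i - 1) k) pvMd) else dp')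
            (pvSet2 dp i j 0)) dp)
      ((List.replicate (N + 1).toNat pvRep0).set 1 (pvRowA 1))).getD m []
      = (if 1 ≤ m ∧ m ≤ n + 1 then pvRowA m else pvRep0) := by
  induction n with
  | zero =>
    rw [show ((2 : Int) + ((0 : Nat) : Int)) = 2 by norm_num,
      PySem.List.pyRange_one_eq_nil (le_refl 2)]
    simp only [List.foldl_nil]
    constructor
    · rw [List.length_set, List.length_replicate]
    · intro m hm
      by_cases h1 : m = 1
      · subst h1
        rw [rowD_set_self _ _ _ (by rwa [List.length_replicate])]
        norm_num
      · rw [rowD_set_ne _ _ _ _ h1]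
        rw [show (List.replicate (N + 1).toNat pvRep0).getD m [] = pvRep0 from by
          simp [List.getD_eq_getElem?_getD, hm]]
        have : ¬ (1 ≤ m ∧ m ≤ 0 + 1) := by omega
        rw [if_neg this]
  | succ n ih =>
    have hn' : (n : Int) ≤ N - 1 := by push_cast at hn ⊢; omega
    obtain ⟨ihlen, ihrow⟩ := ih hn'
    have hsplit : PySem.List.pyRange 2 (2 + ((n + 1 : Nat) : Int)) 1
        = PySem.List.pyRange 2 (2 + (n : Int)) 1 ++ [2 + (n : Int)] := by
      rw [show (2 + ((n + 1 : Nat) : Int)) = (2 + (n : Int)) + 1 by push_cast; ring]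
      exact PySem.List.pyRange_one_succ_right (by omega)
    rw [hsplit, List.foldl_append]
    set T := (PySem.List.pyRange 2 (2 + (n : Int)) 1).foldl (fun dp i =>
        pvJs.foldl (fun dp j =>
          pvJs.foldl (fun dp' k => if 2 ≤ |j - k| then
              pvSet2 dp' i j (PySem.Int.mod (pvGet2 dp' i j + pvGet2 dp' (i - 1) k) pvMd) else dp')
            (pvSet2 dp i j 0)) dp)
      ((List.replicate (N + 1).toNat pvRep0).set 1 (pvRowA 1)) with hT
    simp only [List.foldl_cons, List.foldl_nil]
    have hiN : ((2 + (n : Int))).toNat = n + 2 := by omega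
    have hlenT : ((2 + (n : Int))).toNat < T.length := by rw [ihlen, hiN]; omega
    have hrowT : (T.getD ((2 + (n : Int))).toNat []).length = 10 := by
      rw [hiN, ihrow (n + 2) (by omega), if_neg (by omega)]
      simp [pvRep0]
    rw [jfold (2 + (n : Int)) (by omega) pvJs (by decide) T hlenT hrowT]
    have hprev : T.getD ((2 + (n : Int)) - 1).toNat [] = pvRowA (n + 1) := by
      rw [show ((2 + (n : Int)) - 1).toNat = n + 1 by omega]
      rw [ihrow (n + 1) (by omega), if_pos (by omega)]
    have hcur : T.getD ((2 + (n : Int))).toNat [] = pvRep0 := by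
      rw [hiN, ihrow (n + 2) (by omega), if_neg (by omega)]
    rw [hprev, hcur, hiN]
    have hnew : pvJs.foldl (fun r j => r.set j.toNat (pvF (pvRowA (n + 1)) j)) pvRep0
        = pvRowA (n + 2) := rfl
    rw [hnew]
    constructor
    · rw [List.length_set, ihlen]
    · intro m hm
      by_cases he : m = n + 2
      · subst he
        rw [rowD_set_self _ _ _ (by rw [ihlen]; omega)]
        rw [if_pos (by omega)]
      · rw [rowD_set_ne _ _ _ _ he, ihrow m hm]
        by_cases h1 : 1 ≤ m ∧ m ≤ n + 1
        · rw [if_pos h1, if_pos (by omega)]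
        · rw [if_neg h1, if_neg (by omega)]

-- A's value, characterised: the digit row of length N, summed over digits 1..9, mod p
lemma countA_eq (N : Int) (hN : 1 ≤ N) :
    count_valid_integers N
    = PySem.Int.mod ((pvJs.map (fun j => (pvRowA N.toNat).getD j.toNat 0)).sum) pvMd := by
  unfold count_valid_integers
  simp only [pyRange_js, show (998244353 : Int) = pvMd from rfl]
  rw [show (PySem.List.pyRange 0 (N + 1) 1).map (fun _ => List.replicate 10 (0 : Int))
      = List.replicate (N + 1).toNat pvRep0 from by
    rw [List.map_const', PySem.List.length_pyRange_one,
      show (N + 1 - 0).toNat = (N + 1).toNat by omega]; rfl]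
  rw [basefold pvJs _ (by rw [List.length_replicate]; omega)]
  rw [show (List.replicate (N + 1).toNat pvRep0).getD 1 [] = pvRep0 from by
    simp [List.getD_eq_getElem?_getD, show 1 < (N + 1).toNat by omega]]
  rw [show pvJs.foldl (fun r j => r.set j.toNat (1 : Int)) pvRep0 = pvRowA 1 from by decide]
  rw [show PySem.List.pyRange 2 (N + 1) 1
      = PySem.List.pyRange 2 (2 + (((N - 1).toNat : Nat) : Int)) 1 from by
    rw [show (2 + (((N - 1).toNat : Nat) : Int)) = N + 1 by omega]]
  obtain ⟨hlen, hrow⟩ := outer_inv N hN (N - 1).toNat (by omega)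
  refine congrArg (fun s => PySem.Int.mod s pvMd) (congrArg List.sum (List.map_congr_left ?_))
  intro j hj
  exact congrArg (fun r => r.getD j.toNat 0)
    ((hrow N.toNat (by omega)).trans (if_pos (by omega)))

-- ===== casts into ZMod and the matrix picture =====

def pvCastM (A : List (List Int)) : Matrix (Fin 9) (Fin 9) (ZMod pvP) :=
  Matrix.of fun i j => ((pvGetE A i.val j.val : Int) : ZMod pvP)

def pvMmat : Matrix (Fin 9) (Fin 9) (ZMod pvP) :=
  Matrix.of fun i j => if 2 ≤ |((i.val : Nat) : Int) - ((j.val : Nat) : Int)| then 1 else 0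

def pvOnes : Fin 9 → ZMod pvP := fun _ => 1

def pvVRow (n : Nat) : Fin 9 → ZMod pvP :=
  fun j => (((pvRowA (n + 1)).getD (j.val + 1) 0 : Int) : ZMod pvP)

-- cast of A's inner accumulation: the running mod disappears in ZMod
lemma cast_fold (prev : List Int) (j : Int) (ks : List Int) :
    ∀ acc : Int,
    ((ks.foldl (fun a k => if 2 ≤ |j - k| then PySem.Int.mod (a + prev.getD k.toNat 0) pvMd else a) acc : Int) : ZMod pvP)
    = (acc : ZMod pvP)
      + (ks.map (fun k => if 2 ≤ |j - k| then ((prev.getD k.toNat 0 : Int) : ZMod pvP) else 0)).sum := by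
  induction ks with
  | nil => intro acc; simp
  | cons k t ih =>
    intro acc
    simp only [List.foldl_cons, List.map_cons, List.sum_cons]
    by_cases hc : 2 ≤ |j - k|
    · rw [if_pos hc, if_pos hc, ih, cast_pymod, Int.cast_add]
      ring
    · rw [if_neg hc, if_neg hc, ih]
      ring

lemma nextRow_getD (prev : List Int) (j : Fin 9) :
    (pvNextRow prev).getD (j.val + 1) 0 = pvF prev (((j.val + 1 : Nat)) : Int) := by
  fin_cases j <;> rfl

lemma vRow_succ (n : Nat) : pvVRow (n + 1) = pvMmat.mulVec (pvVRow n) := by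
  funext j
  show (((pvNextRow (pvRowA (n + 1))).getD (j.val + 1) 0 : Int) : ZMod pvP) = _
  fin_cases j <;>
  · rw [nextRow_getD]
    show ((pvF (pvRowA (n + 1)) _ : Int) : ZMod pvP) = _
    rw [pvF, cast_fold]
    simp only [Matrix.mulVec, dotProduct, pvMmat, pvVRow, Matrix.of_apply,
      Fin.sum_univ_succ, Fin.sum_univ_zero, pvJs, List.map_cons, List.map_nil,
      List.sum_cons, List.sum_nil]
    norm_num [show Int.toNat 1 = 1 from rfl, show Int.toNat 2 = 2 from rfl,
      show Int.toNat 3 = 3 from rfl, show Int.toNat 4 = 4 from rfl, show Int.toNat 5 = 5 from rfl,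
      show Int.toNat 6 = 6 from rfl, show Int.toNat 7 = 7 from rfl, show Int.toNat 8 = 8 from rfl,
      show Int.toNat 9 = 9 from rfl]

lemma vRow_pow (n : Nat) : pvVRow n = (pvMmat ^ n).mulVec pvOnes := by
  induction n with
  | zero =>
    funext j
    rw [pow_zero, Matrix.one_mulVec]
    fin_cases j <;> norm_num [pvVRow, pvRowA, pvOnes]
  | succ n ih =>
    rw [vRow_succ, ih, Matrix.mulVec_mulVec, ← pow_succ']

-- A's result, in ZMod
lemma countA_cast (N : Int) (hN : 1 ≤ N) :
    ((count_valid_integers N : Int) : ZMod pvP) = ∑ j : Fin 9, pvVRow (N.toNat - 1) j := by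
  rw [countA_eq N hN, cast_pymod]
  have hstep : N.toNat - 1 + 1 = N.toNat := by omega
  simp only [pvJs, List.map_cons, List.map_nil, List.sum_cons, List.sum_nil,
    Fin.sum_univ_succ, Fin.sum_univ_zero, pvVRow, hstep]
  push_cast
  norm_num

-- B's matrix product is matrix multiplication in ZMod
lemma castM_mul (A B : List (List Int)) : pvCastM (pvMatMul A B) = pvCastM A * pvCastM B := by
  ext i j
  have hi : i.val < 9 := i.isLt
  have hj : j.val < 9 := j.isLt
  show ((pvGetE (pvMatMul A B) i.val j.val : Int) : ZMod pvP) = _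
  rw [show pvGetE (pvMatMul A B) i.val j.val
      = PySem.Int.mod (((List.range 9).map (fun k => pvGetE A i.val k * pvGetE B k j.val)).sum) pvMd from by
    unfold pvMatMul pvGetE
    rw [PySem.List.getD_map_range _ 9 i.val [] hi, PySem.List.getD_map_range _ 9 j.val (0 : Int) hj]]
  rw [cast_pymod]
  rw [show (List.range 9) = [0, 1, 2, 3, 4, 5, 6, 7, 8] from rfl]
  simp only [Matrix.mul_apply, Fin.sum_univ_succ, Fin.sum_univ_zero, pvCastM, Matrix.of_apply,
    List.map_cons, List.map_nil, List.sum_cons, List.sum_nil]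
  push_cast
  norm_num [add_assoc]

lemma castM_id : pvCastM pvId9 = 1 := by
  ext i j
  fin_cases i <;> fin_cases j <;> rfl

lemma castM_M0 : pvCastM pvM0 = pvMmat := by
  ext i j
  fin_cases i <;> fin_cases j <;> rfl

lemma powLoop_cast (e : Nat) : ∀ P M : List (List Int),
    pvCastM (pvPowLoop P M e) = pvCastM P * (pvCastM M) ^ e := by
  induction e using Nat.strong_induction_on with
  | _ e ih =>
    intro P M
    rw [pvPowLoop]
    by_cases h : e = 0
    · simp [h]
    · rw [dif_neg h, ih (e / 2) (Nat.div_lt_self (Nat.pos_of_ne_zero h) one_lt_two)]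
      have hMM : pvCastM (pvMatMul M M) = pvCastM M * pvCastM M := castM_mul M M
      have hsq : pvCastM M * pvCastM M = (pvCastM M) ^ 2 := (sq (pvCastM M)).symm
      by_cases hp : e % 2 = 1
      · rw [if_pos hp, castM_mul, hMM, hsq, ← pow_mul, mul_assoc,
          ← pow_succ', show 2 * (e / 2) + 1 = e by omega]
      · rw [if_neg hp, hMM, hsq, ← pow_mul, show 2 * (e / 2) = e by omega]

-- B's result, in ZMod
lemma countB_cast (N : Int) :
    ((count_valid_integers_alt N : Int) : ZMod pvP)
    = ∑ i : Fin 9, ∑ j : Fin 9, (pvMmat ^ (N - 1).toNat) i j := by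
  show ((PySem.Int.mod (((List.range 9).flatMap (fun i => (List.range 9).map
      (fun j => pvGetE (pvPowLoop pvId9 pvM0 (N - 1).toNat) i j))).sum) pvMd : Int) : ZMod pvP) = _
  rw [cast_pymod]
  have hP : pvCastM (pvPowLoop pvId9 pvM0 (N - 1).toNat) = pvMmat ^ (N - 1).toNat := by
    rw [powLoop_cast, castM_id, castM_M0, one_mul]
  rw [show (List.range 9) = [0, 1, 2, 3, 4, 5, 6, 7, 8] from rfl]
  simp only [List.flatMap_cons, List.flatMap_nil, List.map_cons, List.map_nil,
    List.sum_append, List.sum_cons, List.sum_nil, List.append_nil,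
    Fin.sum_univ_succ, Fin.sum_univ_zero]
  rw [← hP]
  simp only [pvCastM, Matrix.of_apply]
  push_cast
  norm_num [add_assoc]

-- the two vector pictures coincide
lemma sums_eq (e : Nat) :
    (∑ j : Fin 9, ((pvMmat ^ e).mulVec pvOnes) j) = ∑ i : Fin 9, ∑ j : Fin 9, (pvMmat ^ e) i j := by
  simp [Matrix.mulVec, dotProduct, pvOnes]

-- integers in [0, p) with the same image in ZMod p are equal
lemma pv_cast_inj (a b : Int) (ha0 : 0 ≤ a) (ha1 : a < pvMd) (hb0 : 0 ≤ b) (hb1 : b < pvMd)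
    (h : (a : ZMod pvP) = b) : a = b := by
  have hmod : a % ((pvP : Nat) : Int) = b % ((pvP : Nat) : Int) :=
    (ZMod.intCast_eq_intCast_iff a b pvP).mp h
  have hpv : ((pvP : Nat) : Int) = pvMd := by norm_num [pvP, pvMd]
  rw [hpv, Int.emod_eq_of_lt ha0 ha1, Int.emod_eq_of_lt hb0 hb1] at hmod
  exact hmod

lemma mod_nonneg' (a : Int) : 0 ≤ PySem.Int.mod a pvMd :=
  PySem.Int.mod_nonneg a (by norm_num [pvMd])

lemma mod_lt' (a : Int) : PySem.Int.mod a pvMd < pvMd :=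
  PySem.Int.mod_lt a (by norm_num [pvMd])

-- ===== VERDICT (by name: the statement is the Claim_ definition above) =====
theorem count_valid_integers_spec : Claim_equal_count_valid_integers := by
  intro N _ hPre
  have hN : 1 ≤ N := hPre
  show count_valid_integers N = count_valid_integers_alt N
  have hA := countA_eq N hN
  have hBshape : count_valid_integers_alt N
      = PySem.Int.mod (((List.range 9).flatMap (fun i => (List.range 9).map
          (fun j => pvGetE (pvPowLoop pvId9 pvM0 (N - 1).toNat) i j))).sum) pvMd := rfl
  have hcast : ((count_valid_integers N : Int) : ZMod pvP)
      = ((count_valid_integers_alt N : Int) : ZMod pvP) := by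
    rw [countA_cast N hN, countB_cast N, vRow_pow, sums_eq,
      show N.toNat - 1 = (N - 1).toNat by omega]
  refine pv_cast_inj _ _ ?_ ?_ ?_ ?_ hcast
  · rw [hA]; exact mod_nonneg' _
  · rw [hA]; exact mod_lt' _
  · rw [hBshape]; exact mod_nonneg' _
  · rw [hBshape]; exact mod_lt' _
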